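-- pv_equiv track=rewrite | github.com/anovul/chrome_bookmark_organiser | bookmark_cleaner.py | get_canonical_path_segments
-- ===== SOURCE A (Python) =====
-- CHROME_ROOT_NAMES = {"Bookmarks Bar", "Other Bookmarks", "Mobile Bookmarks", "Managed Bookmarks", "Reading list"}
--
-- def get_canonical_path_segments(original_full_path_parts):
--     """
--     Determines the canonical (meaningful and non-redundant) path for a bookmark.
--     Applies internal path deduplication (e.g., A > B > A becomes B > A).
--
--     Args:
--         original_full_path_parts (list): List of folder names from Chrome root down to immediate parent.
--                                        e.g., ["Bookmarks Bar", "Work", "Projects", "Design"]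
--     Returns:
--         list: The canonical path segments. e.g., ["Work", "Projects", "Design"] or ["Bookmarks Bar"]
--     """
--     # Step 1: Filter out Chrome Root Names
--     user_defined_path_parts = []
--     for part in original_full_path_parts:
--         if part not in CHROME_ROOT_NAMES:
--             user_defined_path_parts.append(part)
--         elif not user_defined_path_parts: # If we're still at the beginning and it's a Chrome root
--             continue # Skip this initial Chrome root, will be handled by special case if no user parts
--         else:
--             # If a Chrome root name appears *after* user-defined folders (unlikely but possible),
--             # it's treated as a normal folder name and included.
--             user_defined_path_parts.append(part)
--
--     # Step 2: Handle Bookmarks Directly Under Chrome Roots (or if only Chrome roots were in path)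
--     if not user_defined_path_parts and original_full_path_parts:
--         # If no user-defined folders were found, but the bookmark was under a Chrome root,
--         # use the specific Chrome root name as the canonical path segment.
--         return [original_full_path_parts[0]] # e.g., ["Bookmarks Bar"]
--
--     # Step 3: Internal Path Deduplication (for user-defined paths)
--     final_canonical_path_segments = []
--     seen_names_in_new_path = set()
--
--     # Iterate backwards from the immediate parent towards the root
--     for i in range(len(user_defined_path_parts) - 1, -1, -1):
--         current_folder_name = user_defined_path_parts[i]
--
--         if current_folder_name not in seen_names_in_new_path:
--             # Add to the front to maintain correct path order in the new hierarchy
--             final_canonical_path_segments.insert(0, current_folder_name)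
--             seen_names_in_new_path.add(current_folder_name)
--         else:
--             # If the name is already an ancestor in the *new* path, stop.
--             # This flattens the redundant segment as per your requirement (e.g., A > B > A becomes B > A).
--             break
--
--     return final_canonical_path_segments
-- ===== SOURCE B (Python) =====
-- CHROME_ROOT_NAMES = {"Bookmarks Bar", "Other Bookmarks", "Mobile Bookmarks", "Managed Bookmarks", "Reading list"}
--
-- def get_canonical_path_segments(original_full_path_parts):
--     # First non-root position; everything from there on is user-defined.
--     idx = next((i for i, p in enumerate(original_full_path_parts)
--                 if p not in CHROME_ROOT_NAMES), None)
--     if idx is None: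
--         return [original_full_path_parts[0]] if original_full_path_parts else []
--     user = original_full_path_parts[idx:]
--     # Forward sliding window: 'start' marks the longest distinct suffix so far.
--     last = {}
--     start = 0
--     for i, name in enumerate(user):
--         j = last.get(name)
--         if j is not None and j >= start:
--             start = j + 1
--         last[name] = i
--     return user[start:]
-- ===== Notes on version B (the rewrite author's own statement) =====
-- stated objective: alternative
-- what changed: A filters roots with an accumulator loop and dedups by scanning backwards with a seen-set, front-inserting and breaking on the first repeat; B locates the first non-root name, then makes one forward pass keeping a last-seen-index dict and a sliding-window start pointer, and returns the slice user[start:].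
import Mathlib
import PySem

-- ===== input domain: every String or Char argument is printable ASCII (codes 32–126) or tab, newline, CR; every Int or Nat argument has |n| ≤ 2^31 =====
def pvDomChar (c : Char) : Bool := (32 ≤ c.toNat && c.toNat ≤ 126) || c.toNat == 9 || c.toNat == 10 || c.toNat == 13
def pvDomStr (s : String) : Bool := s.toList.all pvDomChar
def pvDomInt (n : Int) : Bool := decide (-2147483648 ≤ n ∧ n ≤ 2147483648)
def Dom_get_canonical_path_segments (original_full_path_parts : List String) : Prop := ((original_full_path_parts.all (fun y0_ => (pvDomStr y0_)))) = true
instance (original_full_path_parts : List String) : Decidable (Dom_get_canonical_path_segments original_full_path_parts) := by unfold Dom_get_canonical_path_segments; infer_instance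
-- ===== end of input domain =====

-- B replaces A's backward break-loop with a forward sliding-window pass (last-seen-index dict +
-- start pointer) and finds the user-defined tail by locating the first non-root name; same value.


def pvRoots : List String := ["Bookmarks Bar", "Other Bookmarks", "Mobile Bookmarks", "Managed Bookmarks", "Reading list"]

-- ===== PORT A =====
-- Step 1 loop of A (filter out leading Chrome root names)
def pvStep1 (parts : List String) : List String :=
  parts.foldl (fun acc part =>
    if ¬ pvRoots.contains part then acc ++ [part]
    else if acc = [] then acc
    else acc ++ [part]) []

-- A's Step 3 loop: iterate backwards (structural recursion over the reversed list),
-- insert at the front, break on the first repeated name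
def pvDedupBack : List String → PySem.Set String → List String → List String
  | [], _, acc => acc
  | x :: rest, seen, acc =>
    if ¬ PySem.Set.contains seen x then pvDedupBack rest (PySem.Set.add seen x) (x :: acc)
    else acc

def get_canonical_path_segments (original_full_path_parts : List String) : List String :=
  let user := pvStep1 original_full_path_parts
  if user = [] ∧ original_full_path_parts ≠ [] then
    [original_full_path_parts.headD ""]
  else
    pvDedupBack user.reverse PySem.Set.empty []

-- ===== PORT B =====
-- next((i for i, p in enumerate(parts) if p not in CHROME_ROOT_NAMES), None)
def pvFirstNonRoot : List String → Nat → Option Nat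
  | [], _ => none
  | p :: rest, i => if pvRoots.contains p then pvFirstNonRoot rest (i + 1) else some i

-- forward sliding-window pass: dict of last seen indices and a start pointer
def pvSlide : List String → PySem.Dict String Int → Int → Int → Int
  | [], _, start, _ => start
  | name :: rest, last, start, i =>
    let start' := match last.get? name with
      | some j => if start ≤ j then j + 1 else start
      | none => start
    pvSlide rest (last.insert name i) start' (i + 1)

def get_canonical_path_segments_alt (original_full_path_parts : List String) : List String :=
  match pvFirstNonRoot original_full_path_parts 0 with
  | none =>
    match original_full_path_parts with
    | [] => []
    | p0 :: _ => [p0]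
  | some idx =>
    let user := PySem.List.slice original_full_path_parts (some (idx : Int)) none
    let start := pvSlide user PySem.Dict.empty 0 0
    PySem.List.slice user (some start) none

-- ===== PRECONDITION & SPEC =====
def Spec_get_canonical_path_segments (original_full_path_parts : List String) (out : List String) : Prop := out = get_canonical_path_segments_alt original_full_path_parts
instance (original_full_path_parts : List String) (out : List String) : Decidable (Spec_get_canonical_path_segments original_full_path_parts out) := by unfold Spec_get_canonical_path_segments; infer_instance

-- ===== CLAIM (what is proved, stated in full; the proofs are below) =====
def Claim_equal_get_canonical_path_segments : Prop := ∀ (original_full_path_parts : List String), Dom_get_canonical_path_segments original_full_path_parts → Spec_get_canonical_path_segments original_full_path_parts (get_canonical_path_segments original_full_path_parts)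

-- ===== LEMMAS AND PROOFS =====

-- take-while-distinct-and-unseen: the common characterisation of both dedup loops (on the reversed list)
def pvTw : List String → List String → List String
  | [], _ => []
  | x :: rest, seen => if seen.contains x then [] else x :: pvTw rest (x :: seen)

theorem pvTw_congr : ∀ (r s1 s2 : List String), (∀ a, a ∈ s1 ↔ a ∈ s2) → pvTw r s1 = pvTw r s2 := by
  intro r
  induction r with
  | nil => intro _ _ _; rfl
  | cons x rest ih =>
    intro s1 s2 h
    simp only [pvTw, List.contains_eq_mem, decide_eq_true_eq]
    by_cases hx : x ∈ s1
    · rw [if_pos hx, if_pos ((h x).mp hx)]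
    · rw [if_neg hx, if_neg (fun hc => hx ((h x).mpr hc))]
      rw [ih (x :: s1) (x :: s2) (by intro a; simp [h a])]

theorem pvDedupBack_eq_tw : ∀ (r seen acc : List String), pvDedupBack r seen acc = (pvTw r seen).reverse ++ acc := by
  intro r
  induction r with
  | nil => intro seen acc; rfl
  | cons x rest ih =>
    intro seen acc
    simp only [pvDedupBack, pvTw, PySem.Set.contains, List.contains_eq_mem, decide_eq_true_eq]
    by_cases hx : x ∈ seen
    · simp [hx]
    · simp only [hx, not_false_eq_true, if_true, if_false, List.reverse_cons]
      rw [ih, pvTw_congr rest (PySem.Set.add seen x) (x :: seen) (by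
        intro a
        simp only [PySem.Set.add, PySem.Set.contains, List.contains_eq_mem, decide_eq_true_eq]
        by_cases hxs : x ∈ seen
        · simp [hxs]; intro h; subst h; exact hxs
        · simp [hxs, List.mem_append, List.mem_cons, or_comm])]
      simp

theorem pvTw_prefix : ∀ (r seen : List String), pvTw r seen <+: r := by
  intro r
  induction r with
  | nil => intro seen; simp [pvTw]
  | cons x rest ih =>
    intro seen
    simp only [pvTw, List.contains_eq_mem, decide_eq_true_eq]
    by_cases hx : x ∈ seen
    · simp [hx]
    · rw [if_neg hx]
      obtain ⟨t, ht⟩ := ih (x :: seen)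
      exact ⟨t, by simp [ht]⟩

theorem pvTw_cons_seen : ∀ (r : List String) (seen : List String) (x : String),
    pvTw r (x :: seen) = (pvTw r seen).takeWhile (fun y => y != x) := by
  intro r
  induction r with
  | nil => intro seen x; rfl
  | cons y rest ih =>
    intro seen x
    simp only [pvTw, List.contains_eq_mem, decide_eq_true_eq, List.mem_cons]
    by_cases hy : y ∈ seen
    · simp [hy]
    · by_cases hyx : y = x
      · subst hyx
        simp [hy, List.takeWhile]
      · rw [if_neg (by rintro (h | h); exact hyx h; exact hy h), if_neg hy]
        rw [pvTw_congr rest (y :: x :: seen) (x :: y :: seen) (by intro a; simp; tauto),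
          ih (y :: seen) x]
        show _ = match y != x with | true => _ | false => _
        rw [show (y != x) = true from by simp [hyx]]

theorem pvTakeWhile_len_idxOf : ∀ (W : List String) (x : String), x ∈ W →
    (W.takeWhile (fun y => y != x)).length = W.idxOf x := by
  intro W
  induction W with
  | nil => intro x h; simp at h
  | cons a t ih =>
    intro x h
    by_cases hax : a = x
    · subst hax; simp [List.takeWhile, List.idxOf_cons_self]
    · have hxt : x ∈ t := by
        rcases List.mem_cons.mp h with h1 | h1
        · exact absurd h1.symm hax
        · exact h1
      show (match a != x with | true => a :: List.takeWhile (fun y => y != x) t | false => []).length = _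
      rw [show (a != x) = true from by simp [hax]]
      simp only [List.length_cons, ih x hxt]
      exact (List.idxOf_cons_ne t hax).symm

-- invariant of B's forward pass: start always marks the longest distinct suffix of the processed prefix
theorem pvSlide_inv : ∀ (rest p : List String) (last : PySem.Dict String Int),
    (∀ y, last.get? y = if y ∈ p then some ((p.length : Int) - 1 - (p.reverse.idxOf y : Int)) else none) →
    pvSlide rest last ((p.length : Int) - ((pvTw p.reverse []).length : Int)) ((p.length : Int))
      = ((p ++ rest).length : Int) - ((pvTw (p ++ rest).reverse []).length : Int) := by
  intro rest
  induction rest with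
  | nil => intro p last _; simp [pvSlide]
  | cons x rest' ih =>
    intro p last hlast
    have hWpre : pvTw p.reverse [] <+: p.reverse := pvTw_prefix _ _
    have hWtake : pvTw p.reverse [] = p.reverse.take (pvTw p.reverse []).length :=
      List.prefix_iff_eq_take.mp hWpre
    have hflen : (pvTw p.reverse []).length ≤ p.length := by
      have := hWpre.length_le; simpa using this
    have hf' : pvTw (p ++ [x]).reverse [] = x :: ((pvTw p.reverse []).takeWhile (fun y => y != x)) := by
      rw [List.reverse_append]
      show pvTw (x :: p.reverse) [] = _
      simp only [pvTw, List.contains_eq_mem, List.not_mem_nil, decide_false, Bool.false_eq_true,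
        if_false]
      rw [pvTw_cons_seen]
    -- the new start value equals (p++[x]).length - |window of p++[x]|
    have key1 : (match last.get? x with
        | some j => if (p.length : Int) - ((pvTw p.reverse []).length : Int) ≤ j then j + 1
                    else (p.length : Int) - ((pvTw p.reverse []).length : Int)
        | none => (p.length : Int) - ((pvTw p.reverse []).length : Int))
        = (((p ++ [x]).length : Int) - ((pvTw (p ++ [x]).reverse []).length : Int)) := by
      rw [hlast x]
      by_cases hxp : x ∈ p
      · have hxrev : x ∈ p.reverse := by simpa using hxp
        have hk : p.reverse.idxOf x < p.length := by
          have := List.idxOf_lt_length_of_mem hxrev; simpa using this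
        rw [if_pos hxp]; dsimp only
        by_cases hwin : p.reverse.idxOf x < (pvTw p.reverse []).length
        · -- x inside the window
          have hxW : x ∈ pvTw p.reverse [] := by
            rw [hWtake]; exact (List.mem_take_iff_idxOf_lt hxrev).mpr hwin
          have hidx : (pvTw p.reverse []).idxOf x = p.reverse.idxOf x := by
            obtain ⟨t, ht⟩ := hWpre
            conv_rhs => rw [← ht]
            exact (List.idxOf_append_of_mem hxW).symm
          have hlen : ((pvTw p.reverse []).takeWhile (fun y => y != x)).length = p.reverse.idxOf x := by
            rw [pvTakeWhile_len_idxOf _ _ hxW, hidx]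
          rw [if_pos (by push_cast; omega)]
          rw [hf']
          simp only [List.length_cons, hlen, List.length_append, List.length_nil]
          push_cast
          omega
        · -- x outside the window
          have hxW : x ∉ pvTw p.reverse [] := by
            intro hmem
            rw [hWtake] at hmem
            exact hwin ((List.mem_take_iff_idxOf_lt hxrev).mp hmem)
          have hTW : (pvTw p.reverse []).takeWhile (fun y => y != x) = pvTw p.reverse [] :=
            List.takeWhile_eq_self_iff.mpr (by
              intro a ha
              simp only [bne_iff_ne, ne_eq, decide_eq_true_eq]
              intro hax; subst hax; exact hxW ha)
          rw [if_neg (by push_cast; omega)]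
          rw [hf', hTW]
          simp only [List.length_cons, List.length_append, List.length_nil]
          push_cast
          omega
      · -- x not seen yet
        rw [if_neg hxp]; dsimp only
        have hxW : x ∉ pvTw p.reverse [] := by
          intro hmem
          exact hxp (by simpa using hWpre.subset hmem)
        have hTW : (pvTw p.reverse []).takeWhile (fun y => y != x) = pvTw p.reverse [] :=
          List.takeWhile_eq_self_iff.mpr (by
            intro a ha
            simp only [bne_iff_ne, ne_eq, decide_eq_true_eq]
            intro hax; subst hax; exact hxW ha)
        rw [hf', hTW]
        simp only [List.length_cons, List.length_append, List.length_nil]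
        push_cast
        ring
    have key2 : ∀ y, (last.insert x (p.length : Int)).get? y =
        if y ∈ p ++ [x] then some (((p ++ [x]).length : Int) - 1 - ((p ++ [x]).reverse.idxOf y : Int)) else none := by
      intro y
      rw [PySem.Dict.get?_insert]
      by_cases hyx : y = x
      · subst hyx
        rw [if_pos rfl, if_pos (by simp)]
        rw [List.reverse_append]
        simp [List.idxOf_cons_self]
      · rw [if_neg hyx, hlast y, List.reverse_append]
        show _ = if y ∈ p ++ [x] then some _ else none
        have hmem : (y ∈ p ++ [x]) ↔ y ∈ p := by simp [hyx]
        by_cases hyp : y ∈ p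
        · rw [if_pos hyp, if_pos (hmem.mpr hyp)]
          show _ = some (_ - 1 - ((([x] : List String).reverse ++ p.reverse).idxOf y : Int))
          simp only [List.reverse_singleton, List.singleton_append]
          rw [List.idxOf_cons_ne p.reverse (fun h => hyx h.symm)]
          simp only [List.length_append, List.length_singleton]
          push_cast
          congr 1
          omega
        · rw [if_neg hyp, if_neg (fun h => hyp (hmem.mp h))]
    -- apply the induction hypothesis at p ++ [x]
    have hih := ih (p ++ [x]) (last.insert x (p.length : Int)) key2
    show pvSlide rest' (last.insert x (p.length : Int)) _ ((p.length : Int) + 1)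
        = ((p ++ x :: rest').length : Int) - ((pvTw (p ++ x :: rest').reverse []).length : Int)
    rw [key1]
    have harr : (p ++ [x]) ++ rest' = p ++ x :: rest' := by simp
    have hlen1 : ((p ++ [x]).length : Int) = (p.length : Int) + 1 := by push_cast; simp
    rw [← harr]
    rw [← hlen1]
    exact hih

theorem pvStep1_acc : ∀ (l acc : List String), acc ≠ [] →
    l.foldl (fun acc part =>
      if ¬ pvRoots.contains part then acc ++ [part]
      else if acc = [] then acc
      else acc ++ [part]) acc = acc ++ l := by
  intro l
  induction l with
  | nil => intro acc _; simp
  | cons x rest ih =>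
    intro acc hacc
    simp only [List.foldl_cons]
    by_cases hx : pvRoots.contains x
    · rw [if_neg (by simpa using hx), if_neg hacc, ih _ (by simp)]; simp
    · rw [if_pos (by simpa using hx), ih _ (by simp)]; simp

theorem pvStep1_eq : ∀ (parts : List String),
    pvStep1 parts = parts.dropWhile (fun p => pvRoots.contains p) := by
  intro parts
  induction parts with
  | nil => rfl
  | cons x rest ih =>
    simp only [pvStep1, List.foldl_cons, List.dropWhile_cons]
    by_cases hx : pvRoots.contains x
    · rw [if_neg (by simpa using hx), hx]
      simpa [pvStep1] using ih
    · rw [if_pos (by simpa using hx)]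
      simp only [hx, Bool.false_eq_true, if_false, List.nil_append]
      exact pvStep1_acc rest [x] (by simp)

theorem pvFirstNonRoot_spec : ∀ (l : List String) (i : Nat),
    (match pvFirstNonRoot l i with
     | none => l.dropWhile (fun p => pvRoots.contains p) = []
     | some k => i ≤ k ∧ l.drop (k - i) = l.dropWhile (fun p => pvRoots.contains p)
                 ∧ l.dropWhile (fun p => pvRoots.contains p) ≠ []) := by
  intro l
  induction l with
  | nil => intro i; simp [pvFirstNonRoot]
  | cons x rest ih =>
    intro i
    simp only [pvFirstNonRoot, List.dropWhile_cons]
    by_cases hx : pvRoots.contains x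
    · rw [if_pos hx, hx]
      have := ih (i + 1)
      simp only at this ⊢
      cases hk : pvFirstNonRoot rest (i + 1) with
      | none => rw [hk] at this; exact this
      | some k =>
        rw [hk] at this
        obtain ⟨h1, h2, h3⟩ := this
        refine ⟨by omega, ?_, h3⟩
        rw [show k - i = (k - (i + 1)) + 1 by omega]
        simpa using h2
    · rw [if_neg hx]
      simp only [hx, Bool.false_eq_true, if_false]
      exact ⟨le_refl i, by simp, by simp⟩

theorem pv_main : ∀ (parts : List String),
    get_canonical_path_segments parts = get_canonical_path_segments_alt parts := by
  intro parts
  have hfnr := pvFirstNonRoot_spec parts 0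
  unfold get_canonical_path_segments get_canonical_path_segments_alt
  cases hk : pvFirstNonRoot parts 0 with
  | none =>
    rw [hk] at hfnr
    simp only at hfnr
    have huser : pvStep1 parts = [] := by rw [pvStep1_eq]; exact hfnr
    cases parts with
    | nil => simp [huser, pvDedupBack]
    | cons p0 rest => simp [huser]
  | some idx =>
    rw [hk] at hfnr
    simp only at hfnr
    obtain ⟨-, hdrop, hne⟩ := hfnr
    simp only [Nat.sub_zero] at hdrop
    have huser : pvStep1 parts = parts.drop idx := by rw [pvStep1_eq, hdrop]
    have husern : pvStep1 parts ≠ [] := by rw [pvStep1_eq]; exact hne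
    rw [if_neg (by simp [husern])]
    dsimp only
    -- B's user list is A's user list
    rw [PySem.List.slice_from_natCast, ← huser]
    set u := pvStep1 parts with hu
    -- the slide result
    have hslide := pvSlide_inv u [] PySem.Dict.empty (by
      intro y; simp [PySem.Dict.get?_empty])
    simp only [List.length_nil, List.reverse_nil, List.nil_append, Nat.cast_zero] at hslide
    rw [show ((0:Int) - ((pvTw [] []).length : Int)) = 0 by simp [pvTw]] at hslide
    rw [hslide]
    -- both sides are the window
    have hWpre : pvTw u.reverse [] <+: u.reverse := pvTw_prefix _ _
    have hWtake : pvTw u.reverse [] = u.reverse.take (pvTw u.reverse []).length :=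
      List.prefix_iff_eq_take.mp hWpre
    have hflen : (pvTw u.reverse []).length ≤ u.length := by
      have := hWpre.length_le; simpa using this
    have hge : (0:Int) ≤ (u.length : Int) - ((pvTw u.reverse []).length : Int) := by omega
    rw [PySem.List.slice_from u hge]
    rw [pvDedupBack_eq_tw]
    show (pvTw u.reverse []).reverse ++ [] = _
    rw [show ((u.length : Int) - ((pvTw u.reverse []).length : Int)).toNat
          = u.length - (pvTw u.reverse []).length by omega]
    conv_lhs => rw [hWtake]
    rw [List.take_reverse]
    simp

-- ===== VERDICT (by name: the statement is the Claim_ definition above) =====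
theorem get_canonical_path_segments_spec : Claim_equal_get_canonical_path_segments := by
  intro original_full_path_parts _
  unfold Spec_get_canonical_path_segments
  exact pv_main original_full_path_parts
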